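-- pv_equiv track=rewrite | github.com/Teeeeg/AlgorithmOA | OnSite/Aug27JD3.py | solve
-- ===== SOURCE A (Python) =====
-- from typing import List
--
-- def solve(data: List[int], n):
--     oddMax = 0
--     oddTotal = 0
--     evenMax = 0
--     evenTotal = 0
--     res = 0
--
--     for i in range(n):
--         if data[i] % 2:
--             oddMax = max(oddMax, data[i])
--             oddTotal += data[i]
--
--         else:
--             evenMax = max(evenMax, data[i])
--             evenTotal += data[1]
--
--     for i in range(n):
--         if data[i] % 2:
--             if data[i] != oddMax:
--                 res += 1
--         else:
--             if data[i] != evenMax: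
--                 res += 1
--
--     if evenTotal == oddTotal:
--         res += n // 2
--
--     return res
-- ===== SOURCE B (Python) =====
-- def solve(data, n):
--     oddCount = oddTotal = oddMax = oddMaxCount = 0
--     evenCount = evenTotal = evenMax = evenMaxCount = 0
--     for i in range(n):
--         v = data[i]
--         if v % 2:
--             oddCount += 1
--             oddTotal += v
--             if v > oddMax:
--                 oddMax, oddMaxCount = v, 1
--             elif v == oddMax:
--                 oddMaxCount += 1
--         else:
--             evenCount += 1
--             evenTotal += v
--             if v > evenMax:
--                 evenMax, evenMaxCount = v, 1
--             elif v == evenMax: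
--                 evenMaxCount += 1
--     res = (oddCount - oddMaxCount) + (evenCount - evenMaxCount)
--     if evenTotal == oddTotal:
--         res += n // 2
--     return res
-- ===== Notes on version B (the rewrite author's own statement) =====
-- stated objective: faster
-- what changed: B makes a single pass that maintains per-parity count, sum and a running (max, max-multiplicity) pair, replacing A's second full index scan that recounts non-max elements; B sums the even elements themselves where A's typo sums data[1] per even element.
-- intended difference: On inputs with n >= 2 where A's typo `evenTotal += data[1]` (accumulating data[1] once per even element instead of the element itself) flips the tie test evenTotal == oddTotal, A wrongly adds or omits the n//2 bonus; B compares the true even sum with the odd sum, which is the evident intent. — e.g. on solve([4, 1, 3], 3): A returns 1, B returns 2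
import Mathlib
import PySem

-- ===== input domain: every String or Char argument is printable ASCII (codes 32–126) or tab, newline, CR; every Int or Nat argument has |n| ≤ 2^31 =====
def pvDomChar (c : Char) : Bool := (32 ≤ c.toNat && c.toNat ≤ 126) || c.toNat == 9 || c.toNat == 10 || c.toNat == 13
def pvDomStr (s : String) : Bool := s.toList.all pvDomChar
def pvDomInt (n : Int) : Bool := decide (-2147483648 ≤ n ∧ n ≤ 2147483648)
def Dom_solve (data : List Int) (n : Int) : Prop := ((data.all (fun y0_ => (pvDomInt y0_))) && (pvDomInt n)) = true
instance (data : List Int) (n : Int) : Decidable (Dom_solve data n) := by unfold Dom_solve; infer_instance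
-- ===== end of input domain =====

-- B replaces A's two index passes by ONE pass maintaining per-parity count, sum and a running
-- (max, max-multiplicity) pair; B sums the even elements themselves where A sums data[1] per
-- even element, so the n//2 tie bonus differs exactly on D_solve below.

-- ===== PORT A =====
def solve (data : List Int) (n : Int) : Int :=
  -- state: (oddMax, oddTotal, evenMax, evenTotal)
  let s := (PySem.List.pyRange 0 n 1).foldl
    (fun (st : Int × Int × Int × Int) i =>
      let v := PySem.List.pyGetD data i 0
      if PySem.Int.mod v 2 ≠ 0 then
        (max st.1 v, st.2.1 + v, st.2.2.1, st.2.2.2)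
      else
        (st.1, st.2.1, max st.2.2.1 v, st.2.2.2 + PySem.List.pyGetD data 1 0))
    (0, 0, 0, 0)
  let res := (PySem.List.pyRange 0 n 1).foldl
    (fun r i =>
      let v := PySem.List.pyGetD data i 0
      if PySem.Int.mod v 2 ≠ 0 then
        (if v ≠ s.1 then r + 1 else r)
      else
        (if v ≠ s.2.2.1 then r + 1 else r))
    0
  if s.2.2.2 = s.2.1 then res + PySem.Int.floordiv n 2 else res

-- ===== PORT B =====
structure BSt where
  oc : Int
  ot : Int
  om : Int
  omc : Int
  ec : Int
  et : Int
  em : Int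
  emc : Int
deriving DecidableEq, Repr

def solve_alt (data : List Int) (n : Int) : Int :=
  let s := (PySem.List.pyRange 0 n 1).foldl
    (fun (st : BSt) i =>
      let v := PySem.List.pyGetD data i 0
      if PySem.Int.mod v 2 ≠ 0 then
        if v > st.om then
          { st with oc := st.oc + 1, ot := st.ot + v, om := v, omc := 1 }
        else if v = st.om then
          { st with oc := st.oc + 1, ot := st.ot + v, omc := st.omc + 1 }
        else
          { st with oc := st.oc + 1, ot := st.ot + v }
      else
        if v > st.em then
          { st with ec := st.ec + 1, et := st.et + v, em := v, emc := 1 }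
        else if v = st.em then
          { st with ec := st.ec + 1, et := st.et + v, emc := st.emc + 1 }
        else
          { st with ec := st.ec + 1, et := st.et + v })
    ⟨0, 0, 0, 0, 0, 0, 0, 0⟩
  let res := (s.oc - s.omc) + (s.ec - s.emc)
  if s.et = s.ot then res + PySem.Int.floordiv n 2 else res

-- ===== PRECONDITION & SPEC =====
-- Pre_ excludes exactly the inputs where Python A raises IndexError: an index i < n outside data,
-- or an even element among the first n while data has no index 1 (A's `evenTotal += data[1]`).
def Pre_solve (data : List Int) (n : Int) : Prop :=
  n ≤ (data.length : Int) ∧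
  ((data.take n.toNat).any (fun v => PySem.Int.mod v 2 == 0) = true → 2 ≤ data.length)
instance (data : List Int) (n : Int) : Decidable (Pre_solve data n) := by
  unfold Pre_solve; infer_instance
def pvWitness_solve : List Int × Int := ([3, 2, 5, 5, 4], 5)

-- On inputs with n >= 2 where A's typo `evenTotal += data[1]` (accumulating data[1] once per even
-- element instead of the element itself) flips the tie test evenTotal == oddTotal, A wrongly adds
-- or omits the n//2 bonus; B compares the true even sum with the odd sum, the evident intent.
def D_solve (data : List Int) (n : Int) : Prop :=
  let e := (data.take n.toNat).filter (· % 2 == 0)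
  let s := ((data.take n.toNat).filter (· % 2 == 1)).sum
  2 ≤ n ∧ ¬(((e.length : Int) * data.getD 1 0 = s) ↔ e.sum = s)
instance (data : List Int) (n : Int) : Decidable (D_solve data n) := by
  unfold D_solve; infer_instance

def Spec_solve (data : List Int) (n : Int) (out : Int) : Prop :=
  ¬ D_solve data n → out = solve_alt data n
instance (data : List Int) (n : Int) (out : Int) : Decidable (Spec_solve data n out) := by
  unfold Spec_solve; infer_instance

def pvDiffWitness_solve : List Int × Int := ([4, 1, 3], 3)
def pvDiffWitnessOut_solve : Int × Int := (1, 2)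

-- ===== CLAIM (what is proved, stated in full; the proofs are below) =====
def Claim_unchanged_solve : Prop := ∀ (data : List Int) (n : Int), Dom_solve data n → Pre_solve data n → Spec_solve data n (solve data n)
def Claim_changed_solve : Prop := Dom_solve (pvDiffWitness_solve.1) (pvDiffWitness_solve.2) ∧ Pre_solve (pvDiffWitness_solve.1) (pvDiffWitness_solve.2) ∧ D_solve (pvDiffWitness_solve.1) (pvDiffWitness_solve.2) ∧ solve (pvDiffWitness_solve.1) (pvDiffWitness_solve.2) = pvDiffWitnessOut_solve.1 ∧ solve_alt (pvDiffWitness_solve.1) (pvDiffWitness_solve.2) = pvDiffWitnessOut_solve.2 ∧ pvDiffWitnessOut_solve.1 ≠ pvDiffWitnessOut_solve.2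
def Claim_exact_solve : Prop := ∀ (data : List Int) (n : Int), Dom_solve data n → Pre_solve data n → D_solve data n → solve data n ≠ solve_alt data n

-- ===== LEMMAS AND PROOFS =====

-- odd test (Python truthiness of v % 2), used throughout the proofs
def podd (v : Int) : Bool := !(PySem.Int.mod v 2 == 0)

-- bridges between D_solve's plain-Lean phrasing and the ports' PySem primitives
theorem filt_odd (l : List Int) : l.filter (fun v => v % 2 == 1) = l.filter podd := by
  refine List.filter_congr (fun v _ => ?_)
  have h : PySem.Int.mod v 2 = v % 2 := PySem.Int.mod_eq_emod_of_pos (by omega)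
  simp only [podd, h]
  rcases (show v % 2 = 0 ∨ v % 2 = 1 by omega) with h2 | h2 <;> simp [h2]

theorem filt_even (l : List Int) : l.filter (fun v => v % 2 == 0) = l.filter (fun v => !podd v) := by
  refine List.filter_congr (fun v _ => ?_)
  simp [podd]

theorem getD_eq_pyGetD (data : List Int) : data.getD 1 0 = PySem.List.pyGetD data 1 0 := by
  simp [pysem]

-- max-with-phantom-0, matching the two ports' running maxima
def mx0 (l : List Int) : Int := l.foldl max 0

-- a fold of `f acc data[i]` over range(m), m ≤ len(data), is a fold over the first m elements
theorem foldl_range_take {σ : Type} (data : List Int) (f : σ → Int → σ) (init : σ) :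
    ∀ (m : Nat), m ≤ data.length →
      (PySem.List.pyRange 0 (m : Int) 1).foldl
        (fun acc i => f acc (PySem.List.pyGetD data i 0)) init
      = (data.take m).foldl f init := by
  intro m
  induction m generalizing init with
  | zero => intro h; simp [PySem.List.pyRange_one_eq_nil]
  | succ k ih =>
    intro h
    have hcast : ((k + 1 : Nat) : Int) = (k : Int) + 1 := by push_cast; ring
    rw [hcast, PySem.List.pyRange_one_succ_right (by omega), List.foldl_append,
      ih init (by omega), List.take_add_one, List.foldl_append]
    simp [List.getElem?_eq_getElem (show k < data.length by omega)]

theorem foldl_range_take_int {σ : Type} (data : List Int) (f : σ → Int → σ) (init : σ)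
    (n : Int) (h : n ≤ (data.length : Int)) :
    (PySem.List.pyRange 0 n 1).foldl
      (fun acc i => f acc (PySem.List.pyGetD data i 0)) init
    = (data.take n.toNat).foldl f init := by
  by_cases hn : 0 ≤ n
  · have : n = ((n.toNat : Nat) : Int) := by omega
    rw [this, foldl_range_take data f init n.toNat (by omega)]
    congr 1
  · rw [PySem.List.pyRange_one_eq_nil (by omega), show n.toNat = 0 by omega]
    simp

theorem mx0_append (l : List Int) (x : Int) : mx0 (l ++ [x]) = max (mx0 l) x := by
  simp [mx0, List.foldl_append]

theorem le_mx0 (l : List Int) (x : Int) (hx : x ∈ l) : x ≤ mx0 l :=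
  (PySem.List.le_foldl_max l 0).2 x hx

theorem count_eq_zero_of_gt_mx0 (l : List Int) (v : Int) (h : mx0 l < v) : l.count v = 0 := by
  rw [List.count_eq_zero]
  intro hv
  exact absurd (le_mx0 l v hv) (by omega)

-- multiplicity of the running phantom-0 max after appending one element
theorem maxcnt_append (l : List Int) (x : Int) :
    ((l ++ [x]).count (mx0 (l ++ [x])) : Int)
    = if x > mx0 l then 1
      else if x = mx0 l then (l.count (mx0 l) : Int) + 1
      else (l.count (mx0 l) : Int) := by
  rcases lt_trichotomy (mx0 l) x with h | h | h
  · rw [if_pos h, mx0_append, max_eq_right (le_of_lt h), List.count_append,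
      count_eq_zero_of_gt_mx0 l x h]
    simp
  · rw [if_neg (by omega), if_pos h.symm, mx0_append, max_eq_left (le_of_eq h.symm),
      List.count_append, ← h]
    simp
  · rw [if_neg (by omega), if_neg (by omega), mx0_append, max_eq_left (le_of_lt h),
      List.count_append]
    simp [Ne.symm (ne_of_gt h)]

-- A's first pass, characterised on the list of scanned elements
theorem stateA (d1 : Int) (l : List Int) :
    l.foldl (fun (st : Int × Int × Int × Int) v =>
        if PySem.Int.mod v 2 ≠ 0 then
          (max st.1 v, st.2.1 + v, st.2.2.1, st.2.2.2)
        else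
          (st.1, st.2.1, max st.2.2.1 v, st.2.2.2 + d1))
      (0, 0, 0, 0)
    = (mx0 (l.filter podd), (l.filter podd).sum, mx0 (l.filter (fun v => !podd v)),
       ((l.filter (fun v => !podd v)).length : Int) * d1) := by
  induction l using List.reverseRecOn with
  | nil => simp [mx0]
  | append_singleton l x ih =>
    rw [List.foldl_append, ih]
    rcases (show x % 2 = 0 ∨ x % 2 = 1 by omega) with hx | hx
    · simp [hx, podd, List.filter_append, mx0_append]
      ring
    · simp [hx, podd, List.filter_append, mx0_append]

-- B's single pass, characterised on the list of scanned elements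
theorem stateB (l : List Int) :
    l.foldl (fun (st : BSt) v =>
      if PySem.Int.mod v 2 ≠ 0 then
        if v > st.om then
          { st with oc := st.oc + 1, ot := st.ot + v, om := v, omc := 1 }
        else if v = st.om then
          { st with oc := st.oc + 1, ot := st.ot + v, omc := st.omc + 1 }
        else
          { st with oc := st.oc + 1, ot := st.ot + v }
      else
        if v > st.em then
          { st with ec := st.ec + 1, et := st.et + v, em := v, emc := 1 }
        else if v = st.em then
          { st with ec := st.ec + 1, et := st.et + v, emc := st.emc + 1 }
        else
          { st with ec := st.ec + 1, et := st.et + v })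
      ⟨0, 0, 0, 0, 0, 0, 0, 0⟩
    = ⟨((l.filter podd).length : Int), (l.filter podd).sum,
       mx0 (l.filter podd), ((l.filter podd).count (mx0 (l.filter podd)) : Int),
       ((l.filter (fun v => !podd v)).length : Int),
       (l.filter (fun v => !podd v)).sum,
       mx0 (l.filter (fun v => !podd v)),
       ((l.filter (fun v => !podd v)).count (mx0 (l.filter (fun v => !podd v))) : Int)⟩ := by
  induction l using List.reverseRecOn with
  | nil => simp [mx0]
  | append_singleton l x ih =>
    rw [List.foldl_append, ih]
    rcases (show x % 2 = 0 ∨ x % 2 = 1 by omega) with hx | hx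
    · have hfo : (l ++ [x]).filter podd = l.filter podd := by
        simp [podd, List.filter_append, hx]
      have hfe : (l ++ [x]).filter (fun v => !podd v)
          = l.filter (fun v => !podd v) ++ [x] := by
        simp [podd, List.filter_append, hx]
      rw [hfo, hfe, maxcnt_append]
      simp [hx, mx0_append]
      split_ifs <;> simp_all <;> try omega
    · have hfo : (l ++ [x]).filter podd = l.filter podd ++ [x] := by
        simp [podd, List.filter_append, hx]
      have hfe : (l ++ [x]).filter (fun v => !podd v)
          = l.filter (fun v => !podd v) := by
        simp [podd, List.filter_append, hx]
      rw [hfo, hfe, maxcnt_append]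
      simp [hx, mx0_append]
      split_ifs <;> simp_all <;> try omega

-- A's second pass: count of non-max elements per parity class
theorem resA (l : List Int) (OM EM : Int) :
    l.foldl (fun r v =>
        if PySem.Int.mod v 2 ≠ 0 then
          (if v ≠ OM then r + 1 else r)
        else
          (if v ≠ EM then r + 1 else r))
      0
    = (((l.filter podd).length : Int) - ((l.filter podd).count OM : Int))
      + (((l.filter (fun v => !podd v)).length : Int)
         - ((l.filter (fun v => !podd v)).count EM : Int)) := by
  induction l using List.reverseRecOn with
  | nil => simp
  | append_singleton l x ih =>
    rw [List.foldl_append, ih]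
    rcases (show x % 2 = 0 ∨ x % 2 = 1 by omega) with hx | hx <;>
      simp [podd, List.filter_append, hx, List.count_append, List.count_singleton] <;>
      by_cases hxe : x = EM <;> by_cases hxo : x = OM <;>
      simp_all <;> omega

-- both ports reduced to the same closed forms over the scanned prefix
theorem solve_closed (data : List Int) (n : Int) (h : n ≤ (data.length : Int)) :
    solve data n
    = ((((data.take n.toNat).filter podd).length : Int)
        - (((data.take n.toNat).filter podd).count (mx0 ((data.take n.toNat).filter podd)) : Int))
      + ((((data.take n.toNat).filter (fun v => !podd v)).length : Int)
        - (((data.take n.toNat).filter (fun v => !podd v)).count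
            (mx0 ((data.take n.toNat).filter (fun v => !podd v))) : Int))
      + (if (((data.take n.toNat).filter (fun v => !podd v)).length : Int)
            * PySem.List.pyGetD data 1 0 = ((data.take n.toNat).filter podd).sum
         then PySem.Int.floordiv n 2 else 0) := by
  unfold solve
  rw [foldl_range_take_int data
      (fun (st : Int × Int × Int × Int) v =>
        if PySem.Int.mod v 2 ≠ 0 then
          (max st.1 v, st.2.1 + v, st.2.2.1, st.2.2.2)
        else
          (st.1, st.2.1, max st.2.2.1 v, st.2.2.2 + PySem.List.pyGetD data 1 0))
      (0, 0, 0, 0) n h,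
    stateA (PySem.List.pyGetD data 1 0) (data.take n.toNat)]
  dsimp only
  rw [foldl_range_take_int data
      (fun r v =>
        if PySem.Int.mod v 2 ≠ 0 then
          (if v ≠ mx0 ((data.take n.toNat).filter podd) then r + 1 else r)
        else
          (if v ≠ mx0 ((data.take n.toNat).filter (fun v => !podd v)) then r + 1 else r))
      0 n h,
    resA (data.take n.toNat)]
  split_ifs <;> omega

theorem solve_alt_closed (data : List Int) (n : Int) (h : n ≤ (data.length : Int)) :
    solve_alt data n
    = ((((data.take n.toNat).filter podd).length : Int)
        - (((data.take n.toNat).filter podd).count (mx0 ((data.take n.toNat).filter podd)) : Int))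
      + ((((data.take n.toNat).filter (fun v => !podd v)).length : Int)
        - (((data.take n.toNat).filter (fun v => !podd v)).count
            (mx0 ((data.take n.toNat).filter (fun v => !podd v))) : Int))
      + (if ((data.take n.toNat).filter (fun v => !podd v)).sum
            = ((data.take n.toNat).filter podd).sum
         then PySem.Int.floordiv n 2 else 0) := by
  unfold solve_alt
  rw [foldl_range_take_int data
      (fun (st : BSt) v =>
        if PySem.Int.mod v 2 ≠ 0 then
          if v > st.om then
            { st with oc := st.oc + 1, ot := st.ot + v, om := v, omc := 1 }
          else if v = st.om then
            { st with oc := st.oc + 1, ot := st.ot + v, omc := st.omc + 1 }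
          else
            { st with oc := st.oc + 1, ot := st.ot + v }
        else
          if v > st.em then
            { st with ec := st.ec + 1, et := st.et + v, em := v, emc := 1 }
          else if v = st.em then
            { st with ec := st.ec + 1, et := st.et + v, emc := st.emc + 1 }
          else
            { st with ec := st.ec + 1, et := st.et + v })
      ⟨0, 0, 0, 0, 0, 0, 0, 0⟩ n h,
    stateB (data.take n.toNat)]
  dsimp only
  split_ifs <;> omega

-- ===== VERDICT (by name: the statements are the Claim_ definitions above) =====
theorem solve_spec : Claim_unchanged_solve := by
  intro data n _ hpre hnd
  rw [solve_closed data n hpre.1, solve_alt_closed data n hpre.1]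
  unfold D_solve at hnd
  simp only [filt_odd, filt_even, getD_eq_pyGetD] at hnd
  push Not at hnd
  by_cases h2 : 2 ≤ n
  · have hiff := hnd h2
    split_ifs with hA hB <;> tauto
  · by_cases hn1 : n = 1
    · have hF : PySem.Int.floordiv n 2 = 0 := by subst hn1; decide
      rw [hF]
      split_ifs <;> omega
    · have h0 : n.toNat = 0 := by omega
      rw [h0]
      simp

theorem solve_changed : Claim_changed_solve := by unfold Claim_changed_solve; decide

theorem solve_tight : Claim_exact_solve := by
  intro data n _ hpre hD
  unfold D_solve at hD
  simp only [filt_odd, filt_even, getD_eq_pyGetD] at hD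
  obtain ⟨h2, hne⟩ := hD
  rw [solve_closed data n hpre.1, solve_alt_closed data n hpre.1]
  have hF : 1 ≤ PySem.Int.floordiv n 2 :=
    (PySem.Int.le_floordiv_iff_mul_le (by omega)).mpr (by omega)
  split_ifs with hA hB <;> first
    | (exact absurd (Iff.intro (fun _ => hB) (fun _ => hA)) hne)
    | omega
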